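-- pv_equiv track=rewrite | github.com/NatanFA/ProgramasPython | PS10.py | trocamatriz3
-- ===== SOURCE A (Python) =====
-- def trocamatriz3(matriz1, matriz2, i, j, k, m, q, t, m10, m11, m12):
--     if (i<0 or i < q-m):
--         return matriz1, matriz2, m10, m11, m12
--     if matriz2[i][j] != ".":
--         if matriz2[i][j] == "#":
--             return matriz1, matriz2, m10, m11, m12
--         else:
--             if matriz1[i][j] == "X":
--                 return trocamatriz3(matriz1, matriz2, i-1, j, k, m, q, t, m10, m11, m12)
--             else:
--                 m10.append(i)
--                 m11.append(j)
--                 m12.append(matriz2[i][j])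
--                 matriz1[i][j] = "X"
--     return trocamatriz3(matriz1, matriz2, i-1, j, k, m, q, t, m10, m11, m12)
-- ===== SOURCE B (Python) =====
-- def trocamatriz3(matriz1, matriz2, i, j, k, m, q, t, m10, m11, m12):
--     # Two-phase iterative rewrite: first collect the rows to process (scan
--     # descending, stop at the first '#'), then apply the marking pass.
--     # Mutates matriz1/m10/m11/m12 in place exactly like the original.
--     lo = max(0, q - m)
--     visited = []
--     for r in range(i, lo - 1, -1):
--         if matriz2[r][j] == "#":
--             break
--         visited.append(r)
--     for r in visited:
--         c = matriz2[r][j]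
--         if c != "." and matriz1[r][j] != "X":
--             m10.append(r)
--             m11.append(j)
--             m12.append(c)
--             matriz1[r][j] = "X"
--     return matriz1, matriz2, m10, m11, m12
-- ===== Notes on version B (the rewrite author's own statement) =====
-- stated objective: alternative
-- what changed: The tail recursion is replaced by a two-phase iteration: one loop collects the descending row indices up to the first '#', a second loop does the marking/appending, removing recursion (and Python's recursion-depth limit) entirely.
import Mathlib
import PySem

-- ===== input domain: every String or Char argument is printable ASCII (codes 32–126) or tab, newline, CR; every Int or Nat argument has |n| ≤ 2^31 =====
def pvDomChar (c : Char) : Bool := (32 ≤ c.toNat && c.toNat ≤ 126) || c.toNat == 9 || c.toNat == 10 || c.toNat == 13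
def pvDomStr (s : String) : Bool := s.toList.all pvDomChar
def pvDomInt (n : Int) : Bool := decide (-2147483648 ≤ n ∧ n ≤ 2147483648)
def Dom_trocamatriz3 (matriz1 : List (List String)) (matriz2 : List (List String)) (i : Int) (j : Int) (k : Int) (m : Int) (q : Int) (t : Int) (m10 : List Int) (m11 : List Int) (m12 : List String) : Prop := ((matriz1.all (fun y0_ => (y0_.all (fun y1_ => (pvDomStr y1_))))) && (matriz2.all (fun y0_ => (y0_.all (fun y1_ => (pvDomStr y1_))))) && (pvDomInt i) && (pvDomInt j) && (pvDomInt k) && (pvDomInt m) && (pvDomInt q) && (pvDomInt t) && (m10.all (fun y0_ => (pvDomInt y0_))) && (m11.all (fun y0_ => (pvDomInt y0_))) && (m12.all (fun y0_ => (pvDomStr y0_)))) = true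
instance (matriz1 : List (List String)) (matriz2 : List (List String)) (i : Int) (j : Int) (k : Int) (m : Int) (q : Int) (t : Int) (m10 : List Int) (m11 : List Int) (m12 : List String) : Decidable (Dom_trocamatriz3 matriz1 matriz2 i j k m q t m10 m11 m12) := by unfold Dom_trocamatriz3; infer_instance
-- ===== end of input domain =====

-- B replaces A's tail recursion by a two-phase iteration (collect the rows up to the
-- first '#', then mark them); return value only — the Python versions also mutate
-- matriz1/m10/m11/m12 in place, identically.

-- shared low-level helper: the Python statement `mz[i][j] = v` (exact for in-range
-- indices incl. negative wraparound; out-of-range indices are excluded by Pre_)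
def pvSetCell (mz : List (List String)) (i j : Int) (v : String) : List (List String) :=
  PySem.List.pySetD mz i (PySem.List.pySetD (PySem.List.pyGetD mz i []) j v)

-- reading `mz[i][j]` totalised with defaults (exact under Pre_'s in-range conditions)
def pvCell (mz : List (List String)) (i j : Int) : String :=
  PySem.List.pyGetD (PySem.List.pyGetD mz i []) j ""

-- ===== PORT A =====
def trocamatriz3 (matriz1 : List (List String)) (matriz2 : List (List String)) (i : Int) (j : Int) (k : Int) (m : Int) (q : Int) (t : Int) (m10 : List Int) (m11 : List Int) (m12 : List String) : List (List String) × List (List String) × List Int × List Int × List String :=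
  if h : i < 0 ∨ i < q - m then (matriz1, matriz2, m10, m11, m12)
  else
    if pvCell matriz2 i j ≠ "." then
      if pvCell matriz2 i j = "#" then (matriz1, matriz2, m10, m11, m12)
      else
        if pvCell matriz1 i j = "X" then
          trocamatriz3 matriz1 matriz2 (i-1) j k m q t m10 m11 m12
        else
          trocamatriz3 (pvSetCell matriz1 i j "X") matriz2 (i-1) j k m q t
            (m10 ++ [i]) (m11 ++ [j]) (m12 ++ [pvCell matriz2 i j])
    else
      trocamatriz3 matriz1 matriz2 (i-1) j k m q t m10 m11 m12
termination_by (i + 1).toNat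
decreasing_by all_goals omega

-- ===== PORT B =====
-- first loop of Source B: rows to process, stopping at the first '#'
def pvVisited (matriz2 : List (List String)) (j : Int) : List Int → List Int
  | [] => []
  | r :: rs => if pvCell matriz2 r j = "#" then [] else r :: pvVisited matriz2 j rs

-- body of Source B's second loop
def pvStep (matriz2 : List (List String)) (j : Int)
    (st : List (List String) × List Int × List Int × List String) (r : Int) :
    List (List String) × List Int × List Int × List String :=
  if pvCell matriz2 r j ≠ "." ∧ pvCell st.1 r j ≠ "X" then
    (pvSetCell st.1 r j "X", st.2.1 ++ [r], st.2.2.1 ++ [j], st.2.2.2 ++ [pvCell matriz2 r j])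
  else st

def trocamatriz3_alt (matriz1 : List (List String)) (matriz2 : List (List String)) (i : Int) (j : Int) (k : Int) (m : Int) (q : Int) (t : Int) (m10 : List Int) (m11 : List Int) (m12 : List String) : List (List String) × List (List String) × List Int × List Int × List String :=
  let lo := max 0 (q - m)
  let visited := pvVisited matriz2 j (PySem.List.pyRange i (lo - 1) (-1))
  let st := visited.foldl (pvStep matriz2 j) (matriz1, m10, m11, m12)
  (st.1, matriz2, st.2)

-- ===== PRECONDITION & SPEC =====
-- Pre_ excludes exactly-typed inputs on which Python raises IndexError, by requiring
-- row r and column j to be in range for BOTH matrices at EVERY row of the scanned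
-- range; this is slightly narrower than A's exact raise set (rows below an early '#'
-- stop, or matriz1 cells the branch never reads, need not be indexable for A to
-- return) — declared in claim.json with a cite.
def Pre_trocamatriz3 (matriz1 : List (List String)) (matriz2 : List (List String)) (i : Int) (j : Int) (k : Int) (m : Int) (q : Int) (t : Int) (m10 : List Int) (m11 : List Int) (m12 : List String) : Prop :=
  i < max 0 (q - m) ∨
    (i < (matriz1.length : Int) ∧ i < (matriz2.length : Int) ∧
     ∀ r ∈ List.range (i.toNat + 1), max 0 (q - m) ≤ (r : Int) →
       PySem.Raise.InRange (PySem.List.pyGetD matriz1 (r : Int) []).length j ∧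
       PySem.Raise.InRange (PySem.List.pyGetD matriz2 (r : Int) []).length j)
instance (matriz1 : List (List String)) (matriz2 : List (List String)) (i : Int) (j : Int) (k : Int) (m : Int) (q : Int) (t : Int) (m10 : List Int) (m11 : List Int) (m12 : List String) : Decidable (Pre_trocamatriz3 matriz1 matriz2 i j k m q t m10 m11 m12) := by unfold Pre_trocamatriz3; infer_instance

def pvWitness_trocamatriz3 : List (List String) × List (List String) × Int × Int × Int × Int × Int × Int × List Int × List Int × List String :=
  ([["."]], [["a"]], 0, 0, 0, 0, 0, 0, [], [], [])

def Spec_trocamatriz3 (matriz1 : List (List String)) (matriz2 : List (List String)) (i : Int) (j : Int) (k : Int) (m : Int) (q : Int) (t : Int) (m10 : List Int) (m11 : List Int) (m12 : List String) (out : List (List String) × List (List String) × List Int × List Int × List String) : Prop := out = trocamatriz3_alt matriz1 matriz2 i j k m q t m10 m11 m12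
instance (matriz1 : List (List String)) (matriz2 : List (List String)) (i : Int) (j : Int) (k : Int) (m : Int) (q : Int) (t : Int) (m10 : List Int) (m11 : List Int) (m12 : List String) (out : List (List String) × List (List String) × List Int × List Int × List String) : Decidable (Spec_trocamatriz3 matriz1 matriz2 i j k m q t m10 m11 m12 out) := by unfold Spec_trocamatriz3; infer_instance

-- ===== CLAIM (what is proved, stated in full; the proofs are below) =====
def Claim_equal_trocamatriz3 : Prop := ∀ (matriz1 : List (List String)) (matriz2 : List (List String)) (i : Int) (j : Int) (k : Int) (m : Int) (q : Int) (t : Int) (m10 : List Int) (m11 : List Int) (m12 : List String), Dom_trocamatriz3 matriz1 matriz2 i j k m q t m10 m11 m12 → Pre_trocamatriz3 matriz1 matriz2 i j k m q t m10 m11 m12 → Spec_trocamatriz3 matriz1 matriz2 i j k m q t m10 m11 m12 (trocamatriz3 matriz1 matriz2 i j k m q t m10 m11 m12)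

-- ===== LEMMAS AND PROOFS =====

lemma alt_base (matriz1 matriz2 : List (List String)) (i j k m q t : Int)
    (m10 m11 : List Int) (m12 : List String) (h : i < max 0 (q - m)) :
    trocamatriz3_alt matriz1 matriz2 i j k m q t m10 m11 m12 = (matriz1, matriz2, m10, m11, m12) := by
  simp only [trocamatriz3_alt]
  rw [PySem.List.pyRange_neg_one_eq_nil (by omega)]
  simp [pvVisited]

lemma alt_step (matriz1 matriz2 : List (List String)) (i j k m q t : Int)
    (m10 m11 : List Int) (m12 : List String) (h : max 0 (q - m) ≤ i) :
    trocamatriz3_alt matriz1 matriz2 i j k m q t m10 m11 m12 =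
      if pvCell matriz2 i j = "#" then (matriz1, matriz2, m10, m11, m12)
      else
        let st := pvStep matriz2 j (matriz1, m10, m11, m12) i
        trocamatriz3_alt st.1 matriz2 (i-1) j k m q t st.2.1 st.2.2.1 st.2.2.2 := by
  simp only [trocamatriz3_alt]
  rw [PySem.List.pyRange_neg_one_cons (by omega)]
  by_cases hc : pvCell matriz2 i j = "#"
  · simp [pvVisited, hc]
  · simp [pvVisited, hc]

lemma main_eq (n : Nat) : ∀ (matriz1 matriz2 : List (List String)) (i j k m q t : Int)
    (m10 m11 : List Int) (m12 : List String), (i + 1).toNat ≤ n →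
    trocamatriz3 matriz1 matriz2 i j k m q t m10 m11 m12 =
    trocamatriz3_alt matriz1 matriz2 i j k m q t m10 m11 m12 := by
  induction n with
  | zero =>
    intro matriz1 matriz2 i j k m q t m10 m11 m12 hn
    have hi : i < 0 := by omega
    rw [trocamatriz3, alt_base _ _ _ _ _ _ _ _ _ _ _ (by omega)]
    simp [hi]
  | succ n ih =>
    intro matriz1 matriz2 i j k m q t m10 m11 m12 hn
    by_cases h : i < 0 ∨ i < q - m
    · rw [trocamatriz3, alt_base _ _ _ _ _ _ _ _ _ _ _ (by omega)]
      simp [h]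
    · have hlo : max 0 (q - m) ≤ i := by omega
      have hn' : (i - 1 + 1).toNat ≤ n := by omega
      rw [trocamatriz3, dif_neg h, alt_step _ _ _ _ _ _ _ _ _ _ _ hlo]
      by_cases hhash : pvCell matriz2 i j = "#"
      · simp [hhash]
      · rw [if_neg hhash]
        by_cases hdot : pvCell matriz2 i j = "."
        · have hstep : pvStep matriz2 j (matriz1, m10, m11, m12) i = (matriz1, m10, m11, m12) := by
            simp [pvStep, hdot]
          rw [hstep]
          simp only [hdot, ne_eq, not_true_eq_false, if_false]
          exact ih _ _ _ _ _ _ _ _ _ _ _ hn'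
        · by_cases hx : pvCell matriz1 i j = "X"
          · have hstep : pvStep matriz2 j (matriz1, m10, m11, m12) i = (matriz1, m10, m11, m12) := by
              simp [pvStep, hx]
            rw [hstep]
            simp only [ne_eq, hdot, not_false_eq_true, if_true, hhash, if_false, hx]
            exact ih _ _ _ _ _ _ _ _ _ _ _ hn'
          · have hstep : pvStep matriz2 j (matriz1, m10, m11, m12) i =
                (pvSetCell matriz1 i j "X", m10 ++ [i], m11 ++ [j], m12 ++ [pvCell matriz2 i j]) := by
              simp [pvStep, hdot, hx]
            rw [hstep]
            simp only [ne_eq, hdot, not_false_eq_true, if_true, hhash, if_false, hx]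
            exact ih _ _ _ _ _ _ _ _ _ _ _ hn'

-- ===== VERDICT (by name: the statement is the Claim_ definition above) =====
theorem trocamatriz3_spec : Claim_equal_trocamatriz3 := by
  intro matriz1 matriz2 i j k m q t m10 m11 m12 _ _
  unfold Spec_trocamatriz3
  exact main_eq (i + 1).toNat matriz1 matriz2 i j k m q t m10 m11 m12 (le_refl _)
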